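-- pv_equiv track=rewrite | github.com/etanyu06/OpenWeatherMap | service/ai.py | _parse_wind_mph
-- ===== SOURCE A (Python) =====
-- def _parse_wind_mph(wind_speed: str) -> int:
--     '''
--     Parse NWS windSpeed such as '10 mph', '5 to 20 mph', '15 to 30 mph'.
--     Returns: Observed max mph as int, or 0 if fails.
--     '''
--     if not wind_speed:
--         return 0
--
--     #Takes all wind speeds and gets max (safest for users as overpreparing is better than underpreparing)
--     nums = []
--     token = ''
--     for ch in wind_speed:
--         if ch.isdigit():
--             token += ch
--         else:
--             if token:
--                 try:
--                     nums.append(int(token))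
--                 except ValueError:
--                     pass
--                 token = ''
--     if token:
--         try:
--             nums.append(int(token))
--         except ValueError:
--             pass
--
--     return max(nums) if nums else 0
-- ===== SOURCE B (Python) =====
-- def _parse_wind_mph(wind_speed: str) -> int:
--     '''
--     Parse NWS windSpeed such as '10 mph', '5 to 20 mph', '15 to 30 mph'.
--     Returns: Observed max mph as int, or 0 if fails.
--     '''
--     # Staged passes instead of one scanning loop with a token accumulator:
--     # 1) mask every non-digit character to a space,
--     # 2) let str.split() cut out the maximal digit runs,
--     # 3) convert and take the max.
--     masked = ''.join(ch if ch.isdigit() else ' ' for ch in wind_speed)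
--     nums = [int(tok) for tok in masked.split()]
--     return max(nums, default=0)
-- ===== Notes on version B (the rewrite author's own statement) =====
-- stated objective: idiomatic
-- what changed: A scans once with an explicit token accumulator and duplicated flush logic; B stages the work in separate passes: mask every non-digit to a space, let str.split() extract the maximal digit runs, convert them in a comprehension and take max(nums, default=0).
import Mathlib
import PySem

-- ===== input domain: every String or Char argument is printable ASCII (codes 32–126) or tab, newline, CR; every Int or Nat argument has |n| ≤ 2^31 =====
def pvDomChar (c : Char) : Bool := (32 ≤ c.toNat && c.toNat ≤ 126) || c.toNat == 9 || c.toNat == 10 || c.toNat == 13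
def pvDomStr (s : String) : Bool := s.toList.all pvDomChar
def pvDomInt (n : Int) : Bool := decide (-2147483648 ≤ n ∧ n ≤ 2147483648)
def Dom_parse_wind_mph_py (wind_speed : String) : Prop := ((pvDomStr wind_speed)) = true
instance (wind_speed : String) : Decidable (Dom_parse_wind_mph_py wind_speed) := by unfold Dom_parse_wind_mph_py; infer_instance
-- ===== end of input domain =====

-- B replaces A's single scanning loop (token accumulator + flush) by staged passes:
-- mask non-digits to spaces, str.split() the masked string, convert, take max (objective: idiomatic).

-- ===== PORT A =====
-- int(token): the tokens A's loop builds are always nonempty runs of chars with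
-- ch.isdigit() (here '0'..'9'), on which int() is plain base-10 digit evaluation and never
-- raises; this helper is exact there and returns none (= ValueError) otherwise, but no
-- other argument reaches it.
def pvTokenInt? (cs : List Char) : Option Int :=
  if cs ≠ [] ∧ cs.all PySem.Chars.isdigit then
    some (cs.foldl (fun a c => a * 10 + ((c.toNat : Int) - 48)) 0)
  else none

-- the duplicated flush block: 'if token: try: nums.append(int(token)) except ValueError: pass'
def pvAFlush (nums : List Int) (token : List Char) : List Int :=
  if token ≠ [] then
    match pvTokenInt? token with
    | some n => nums ++ [n]
    | none => nums
  else nums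

def pvAStep (st : List Int × List Char) (ch : Char) : List Int × List Char :=
  if PySem.Chars.isdigit ch then (st.1, st.2 ++ [ch])
  else (pvAFlush st.1 st.2, [])

def parse_wind_mph_py (wind_speed : String) : Int :=
  if wind_speed.toList = [] then 0
  else
    let st := wind_speed.toList.foldl pvAStep ([], [])
    let nums := pvAFlush st.1 st.2
    match PySem.List.max? nums id with
    | some m => m
    | none => 0

-- ===== PORT B =====
-- 'ch if ch.isdigit() else " "'
def pvMask (c : Char) : Char := if PySem.Chars.isdigit c then c else ' '

-- int(tok): every token str.split() yields from the masked string is a nonempty run of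
-- '0'..'9', on which int() is plain base-10 digit evaluation and never raises; this
-- helper is exact there, and no other argument reaches it.
def pvTokInt (cs : List Char) : Int :=
  cs.foldl (fun a c => a * 10 + ((c.toNat : Int) - 48)) 0

def parse_wind_mph_py_alt (wind_speed : String) : Int :=
  let masked := wind_speed.toList.map pvMask
  let nums := (PySem.Chars.split₀ masked).map pvTokInt
  match PySem.List.max? nums id with
  | some m => m
  | none => 0

-- ===== PRECONDITION & SPEC =====
def Spec_parse_wind_mph_py (wind_speed : String) (out : Int) : Prop := out = parse_wind_mph_py_alt wind_speed
instance (wind_speed : String) (out : Int) : Decidable (Spec_parse_wind_mph_py wind_speed out) := by unfold Spec_parse_wind_mph_py; infer_instance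

-- ===== CLAIM (what is proved, stated in full; the proofs are below) =====
def Claim_equal_parse_wind_mph_py : Prop := ∀ (wind_speed : String), Dom_parse_wind_mph_py wind_speed → Spec_parse_wind_mph_py wind_speed (parse_wind_mph_py wind_speed)

-- ===== LEMMAS AND PROOFS =====

theorem pv_flush_nil (nums : List Int) : pvAFlush nums [] = nums := by
  simp [pvAFlush]

theorem pv_flush_cons (nums : List Int) (d : Char) (ds : List Char)
    (hd : (d :: ds).all PySem.Chars.isdigit = true) :
    pvAFlush nums (d :: ds) = nums ++ [pvTokInt (d :: ds)] := by
  simp [pvAFlush, pvTokenInt?, pvTokInt, hd]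

theorem pv_digit_not_space (c : Char) (h : PySem.Chars.isdigit c = true) :
    PySem.Chars.isspace c = false := by
  have hpq : '0' ≤ c ∧ c ≤ '9' := by simpa [PySem.Chars.isdigit] using h
  obtain ⟨h1, h2⟩ := hpq
  rw [Char.le_def, UInt32.le_iff_toNat_le] at h1 h2
  have h1' : ('0' : Char).toNat ≤ c.toNat := h1
  have h2' : c.toNat ≤ ('9' : Char).toNat := h2
  have e1 : ('0' : Char).toNat = 48 := rfl
  have e2 : ('9' : Char).toNat = 57 := rfl
  simp only [PySem.Chars.isspace]
  simp only [Bool.or_eq_false_iff, Bool.and_eq_false_iff, decide_eq_false_iff_not]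
  omega

-- the core invariant: splitting the masked rest, with 'cur' holding the reversed current
-- token and 'acc' the reversed list of finished tokens, yields exactly the numbers A's
-- scanning loop accumulates.
theorem pv_go_eq (cs : List Char) :
    ∀ (token : List Char) (acc : List (List Char)),
      token.all PySem.Chars.isdigit = true →
      (PySem.Chars.split₀.go (cs.map pvMask) token.reverse acc).map pvTokInt
      = (pvAFlush (cs.foldl pvAStep (acc.reverse.map pvTokInt, token)).1
                  (cs.foldl pvAStep (acc.reverse.map pvTokInt, token)).2) := by
  induction cs with
  | nil =>
      intro token acc hd
      simp only [List.map, List.foldl]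
      cases token with
      | nil => simp [PySem.Chars.split₀.go, pv_flush_nil]
      | cons d ds =>
          rw [pv_flush_cons _ d ds hd]
          simp [PySem.Chars.split₀.go]
  | cons c cs ih =>
      intro token acc hd
      simp only [List.map, List.foldl]
      by_cases hdig : PySem.Chars.isdigit c = true
      · have hmask : pvMask c = c := by simp [pvMask, hdig]
        have hns := pv_digit_not_space c hdig
        have hstepA : pvAStep (acc.reverse.map pvTokInt, token) c
            = (acc.reverse.map pvTokInt, token ++ [c]) := by simp [pvAStep, hdig]
        rw [hstepA, hmask]
        have hgo : PySem.Chars.split₀.go (c :: cs.map pvMask) token.reverse acc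
            = PySem.Chars.split₀.go (cs.map pvMask) (c :: token.reverse) acc := by
          simp [PySem.Chars.split₀.go, hns]
        rw [hgo]
        have : (c :: token.reverse) = (token ++ [c]).reverse := by simp
        rw [this]
        exact ih (token ++ [c]) acc (by simp [List.all_append, hd, hdig])
      · have hmask : pvMask c = ' ' := by simp [pvMask, hdig]
        have hsp : PySem.Chars.isspace ' ' = true := by decide
        have hstepA : pvAStep (acc.reverse.map pvTokInt, token) c
            = (pvAFlush (acc.reverse.map pvTokInt) token, []) := by simp [pvAStep, hdig]
        rw [hstepA, hmask]
        cases token with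
        | nil =>
            have hgo : PySem.Chars.split₀.go (' ' :: cs.map pvMask) [] acc
                = PySem.Chars.split₀.go (cs.map pvMask) [] acc := by
              simp [PySem.Chars.split₀.go, hsp]
            rw [List.reverse_nil] at *
            rw [hgo, pv_flush_nil]
            simpa using ih [] acc (by simp)
        | cons d ds =>
            have hgo : PySem.Chars.split₀.go (' ' :: cs.map pvMask) (d :: ds).reverse acc
                = PySem.Chars.split₀.go (cs.map pvMask) [] ((d :: ds) :: acc) := by
              simp [PySem.Chars.split₀.go, hsp]
            rw [hgo, pv_flush_cons _ d ds hd]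
            have := ih [] ((d :: ds) :: acc) (by simp)
            simpa using this

-- ===== VERDICT (by name: the statement is the Claim_ definition above) =====
theorem parse_wind_mph_py_spec : Claim_equal_parse_wind_mph_py := by
  intro ws _
  unfold Spec_parse_wind_mph_py parse_wind_mph_py parse_wind_mph_py_alt
  by_cases h : ws.toList = []
  · simp [h, PySem.Chars.split₀, PySem.Chars.split₀.go, PySem.List.max?]
  · simp only [if_neg h, PySem.Chars.split₀]
    have := pv_go_eq ws.toList [] [] (by simp)
    simp only [List.reverse_nil, List.map_nil] at this
    rw [this]
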